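-- pv_equiv track=rewrite | github.com/zhangyongming13/test | 字符串合并处理.py | join_and_sort
-- ===== SOURCE A (Python) =====
-- def join_and_sort(string_1, string_2):
--     string_total = string_1 + string_2
--     odd_string = sorted(string_total[::2])
--     even_string = sorted(string_total[1::2])
--     result = []
--     for i in range(len(string_total)):
--         if i % 2 == 1:
--             result.append(even_string.pop(0))
--         else:
--             result.append(odd_string.pop(0))
--     return result
-- ===== SOURCE B (Python) =====
-- def join_and_sort(string_1, string_2):
--     string_total = string_1 + string_2
--     result = [None] * len(string_total)
--     result[::2] = sorted(string_total[::2])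
--     result[1::2] = sorted(string_total[1::2])
--     return result
-- ===== Notes on version B (the rewrite author's own statement) =====
-- stated objective: simpler
-- what changed: Replaces the index loop with its parity branch and the two pop(0) queues by preallocating the result and writing each sorted parity class back with one strided slice assignment.
import Mathlib
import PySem

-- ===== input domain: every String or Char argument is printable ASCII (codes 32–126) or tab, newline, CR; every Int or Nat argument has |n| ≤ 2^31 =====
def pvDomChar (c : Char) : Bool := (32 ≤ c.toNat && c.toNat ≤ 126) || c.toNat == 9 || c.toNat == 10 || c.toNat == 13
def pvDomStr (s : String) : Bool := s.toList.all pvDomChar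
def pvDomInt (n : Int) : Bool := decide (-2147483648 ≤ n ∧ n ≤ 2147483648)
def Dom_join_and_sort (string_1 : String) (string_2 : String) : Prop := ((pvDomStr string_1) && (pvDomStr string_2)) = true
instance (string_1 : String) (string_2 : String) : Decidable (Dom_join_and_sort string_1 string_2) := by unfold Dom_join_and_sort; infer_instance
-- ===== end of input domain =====

-- B replaces A's index loop (parity branch + two pop(0) queues) by writing each
-- sorted parity class back into its stride of a preallocated result in one slice
-- assignment; same return value everywhere.

-- ===== PORT A =====
-- one loop step of A: pop from even_string on odd i, from odd_string on even i
-- (Python's pop(0) on an empty list would raise; pop? returns none exactly there,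
-- in which case the state is left unchanged — that branch is unreachable since the
-- loop makes exactly |odd_string| + |even_string| iterations)
def pvStepA (st : List Char × List Char × List String) (i : Int) :
    List Char × List Char × List String :=
  if PySem.Int.mod i 2 = 1 then
    match PySem.List.pop? st.2.1 0 with
    | some (x, rest) => (st.1, rest, st.2.2 ++ [String.ofList [x]])
    | none => st
  else
    match PySem.List.pop? st.1 0 with
    | some (x, rest) => (rest, st.2.1, st.2.2 ++ [String.ofList [x]])
    | none => st

def join_and_sort (string_1 : String) (string_2 : String) : List String :=
  let string_total := string_1.toList ++ string_2.toList
  -- sorted(string_total[::2]); Python sorts the 1-char strings, which orders them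
  -- exactly like sorting the characters (each char is wrapped as a string on append)
  let odd_string := PySem.List.sorted ((PySem.List.slice? string_total none none 2).getD []) id
  let even_string := PySem.List.sorted ((PySem.List.slice? string_total (some 1) none 2).getD []) id
  let st := (PySem.List.pyRange 0 (string_total.length : Int) 1).foldl pvStepA
    (odd_string, even_string, ([] : List String))
  st.2.2

-- ===== PORT B =====
-- result[::2] = evens; result[1::2] = odds — the preallocated result with its two
-- strided slice assignments IS the alternating merge of the two parity classes
def pvInterleave {α : Type} : List α → List α → List α
  | [], ys => ys
  | x :: xs, ys => x :: pvInterleave ys xs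
termination_by a b => a.length + b.length

def join_and_sort_alt (string_1 : String) (string_2 : String) : List String :=
  let string_total := string_1.toList ++ string_2.toList
  let evens := PySem.List.sorted ((PySem.List.slice? string_total none none 2).getD []) id
  let odds := PySem.List.sorted ((PySem.List.slice? string_total (some 1) none 2).getD []) id
  (pvInterleave evens odds).map (fun c => String.ofList [c])

-- ===== PRECONDITION & SPEC =====
def Spec_join_and_sort (string_1 : String) (string_2 : String) (out : List String) : Prop := out = join_and_sort_alt string_1 string_2
instance (string_1 : String) (string_2 : String) (out : List String) : Decidable (Spec_join_and_sort string_1 string_2 out) := by unfold Spec_join_and_sort; infer_instance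

-- ===== CLAIM (what is proved, stated in full; the proofs are below) =====
def Claim_equal_join_and_sort : Prop := ∀ (string_1 : String) (string_2 : String), Dom_join_and_sort string_1 string_2 → Spec_join_and_sort string_1 string_2 (join_and_sort string_1 string_2)

-- ===== LEMMAS AND PROOFS =====

-- a range of getElem? lookups that are all in bounds keeps its full length
lemma pv_filterMap_length {α : Type} (xs : List α) (c : Nat) (f : Nat → Nat)
    (h : ∀ k < c, f k < xs.length) :
    ((List.range c).filterMap (fun k => xs[f k]?)).length = c := by
  induction c with
  | zero => simp
  | succ c ih =>
      rw [List.range_succ, List.filterMap_append]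
      have hc : f c < xs.length := h c (Nat.lt_succ_self c)
      simp [List.getElem?_eq_getElem hc, ih (fun k hk => h k (Nat.lt_succ_of_lt hk))]

-- length of the even-index slice:  ⌈n/2⌉
lemma pv_len_slice_even {α : Type} (xs : List α) :
    ((PySem.List.slice? xs none none 2).getD []).length = (xs.length + 1) / 2 := by
  simp only [PySem.List.slice?, PySem.List.sliceIndices]
  norm_num
  rcases Nat.eq_zero_or_pos xs.length with h | h
  · simp [h]
  · rw [if_pos h]
    have hc : (((xs.length : Int) + 2 - 1) / 2).toNat = (xs.length + 1) / 2 := by omega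
    rw [hc]
    exact pv_filterMap_length xs _ (fun k => (2 * (k : Int)).toNat)
      (fun k hk => by show (2 * (k : Int)).toNat < xs.length; omega)

-- length of the odd-index slice:  ⌊n/2⌋
lemma pv_len_slice_odd {α : Type} (xs : List α) :
    ((PySem.List.slice? xs (some 1) none 2).getD []).length = xs.length / 2 := by
  simp only [PySem.List.slice?, PySem.List.sliceIndices]
  norm_num
  rcases Nat.lt_or_ge xs.length 2 with h | h
  · rw [if_neg (by omega)]
    simp; omega
  · rw [if_pos (by omega)]
    have hmin : min (1 : Int) (xs.length : Int) = 1 := by omega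
    rw [hmin]
    have hc : (((xs.length : Int) - 1 + 2 - 1) / 2).toNat = xs.length / 2 := by omega
    rw [hc]
    exact pv_filterMap_length xs _ (fun k => ((1 : Int) + 2 * (k : Int)).toNat)
      (fun k hk => by show ((1 : Int) + 2 * (k : Int)).toNat < xs.length; omega)

-- A's loop, started at an even index with the two queues of matching lengths,
-- appends exactly the alternating merge of the two queues
lemma pv_loop_interleave : ∀ (e o : List Char) (acc : List String) (i : Int),
    0 ≤ i → i % 2 = 0 → o.length ≤ e.length → e.length ≤ o.length + 1 →
    ((PySem.List.pyRange i (i + ((e.length : Int) + (o.length : Int))) 1).foldl pvStepA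
        (e, o, acc)).2.2
      = acc ++ (pvInterleave e o).map (fun c => String.ofList [c])
  | [], o, acc, i, _, _, hle, _ => by
      have ho : o = [] := List.length_eq_zero_iff.mp (Nat.le_zero.mp hle)
      subst ho
      simp [PySem.List.pyRange_one_eq_nil (le_refl i), pvInterleave]
  | x :: e', [], acc, i, h0, hmod, _, hle1 => by
      have he' : e' = [] := by simpa using hle1
      subst he'
      rw [show ((([x] : List Char).length : Int) + (([] : List Char).length : Int)) = 1 by simp]
      rw [PySem.List.pyRange_one_cons (by omega), PySem.List.pyRange_one_eq_nil (by omega)]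
      have h1 : ¬ (i % 2 = 1) := by omega
      simp [pvStepA, h1, PySem.List.pop?, PySem.List.pyIdx?, pvInterleave]
  | x :: e', y :: o', acc, i, h0, hmod, hle, hle1 => by
      rw [show ((((x :: e').length : Int)) + (((y :: o').length : Int)))
          = ((e'.length : Int) + (o'.length : Int)) + 2 by simp; ring]
      rw [PySem.List.pyRange_one_cons (by omega), PySem.List.pyRange_one_cons (by omega)]
      simp only [List.foldl_cons]
      have h1 : ¬ (i % 2 = 1) := by omega
      have h2 : (i + 1) % 2 = 1 := by omega
      have s1 : pvStepA (x :: e', y :: o', acc) i = (e', y :: o', acc ++ [String.ofList [x]]) := by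
        simp [pvStepA, h1, PySem.List.pop?, PySem.List.pyIdx?]
      have s2 : pvStepA (e', y :: o', acc ++ [String.ofList [x]]) (i + 1)
          = (e', o', acc ++ [String.ofList [x]] ++ [String.ofList [y]]) := by
        simp [pvStepA, h2, PySem.List.pop?, PySem.List.pyIdx?]
      rw [s1, s2]
      rw [show i + (((e'.length : Int) + (o'.length : Int)) + 2)
          = (i + 1 + 1) + ((e'.length : Int) + (o'.length : Int)) by ring]
      rw [pv_loop_interleave e' o' (acc ++ [String.ofList [x]] ++ [String.ofList [y]]) (i + 1 + 1)
        (by omega) (by omega) (by simpa using hle) (by simpa using hle1)]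
      simp [pvInterleave]
termination_by e _ _ _ => e.length

-- both ports over the already-concatenated character list
lemma pv_main (total : List Char) :
    ((PySem.List.pyRange 0 (total.length : Int) 1).foldl pvStepA
        (PySem.List.sorted ((PySem.List.slice? total none none 2).getD []) id,
         PySem.List.sorted ((PySem.List.slice? total (some 1) none 2).getD []) id,
         ([] : List String))).2.2
      = (pvInterleave (PySem.List.sorted ((PySem.List.slice? total none none 2).getD []) id)
          (PySem.List.sorted ((PySem.List.slice? total (some 1) none 2).getD []) id)).map
          (fun c => String.ofList [c]) := by
  have hle : (PySem.List.sorted ((PySem.List.slice? total none none 2).getD []) id).length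
      = (total.length + 1) / 2 := by
    rw [PySem.List.length_sorted, pv_len_slice_even]
  have hlo : (PySem.List.sorted ((PySem.List.slice? total (some 1) none 2).getD []) id).length
      = total.length / 2 := by
    rw [PySem.List.length_sorted, pv_len_slice_odd]
  have hn : (total.length : Int)
      = 0 + (((PySem.List.sorted ((PySem.List.slice? total none none 2).getD []) id).length : Int)
          + ((PySem.List.sorted ((PySem.List.slice? total (some 1) none 2).getD []) id).length : Int)) := by
    rw [hle, hlo]; push_cast; omega
  rw [hn, pv_loop_interleave _ _ [] 0 (by norm_num) (by norm_num) (by omega) (by omega)]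
  simp

-- ===== VERDICT (by name: the statement is the Claim_ definition above) =====
theorem join_and_sort_spec : Claim_equal_join_and_sort := by
  intro s1 s2 _
  exact pv_main (s1.toList ++ s2.toList)
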